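-- pv_equiv track=rewrite | github.com/duwenzhen/leetcode | 152maximum.py | neg
-- ===== SOURCE A (Python) =====
-- def neg(nums):
--     res = [0] * len(nums)
--     i = len(nums) - 1
--     neg = 0
--     while i >= 0:
--         res[i] = neg
--         if nums[i] < 0:
--            neg = neg + 1
--         i = i - 1
--     return res
-- ===== SOURCE B (Python) =====
-- def neg(nums):
--     total = sum(1 for x in nums if x < 0)
--     seen = 0
--     res = []
--     for x in nums:
--         if x < 0:
--             seen = seen + 1
--         res.append(total - seen)
--     return res
-- ===== Notes on version B (the rewrite author's own statement) =====
-- stated objective: alternative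
-- what changed: Replaces the single backward writing loop by two forward passes: first count all negatives, then maintain a running prefix count and emit total minus prefix at each position.
import Mathlib
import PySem

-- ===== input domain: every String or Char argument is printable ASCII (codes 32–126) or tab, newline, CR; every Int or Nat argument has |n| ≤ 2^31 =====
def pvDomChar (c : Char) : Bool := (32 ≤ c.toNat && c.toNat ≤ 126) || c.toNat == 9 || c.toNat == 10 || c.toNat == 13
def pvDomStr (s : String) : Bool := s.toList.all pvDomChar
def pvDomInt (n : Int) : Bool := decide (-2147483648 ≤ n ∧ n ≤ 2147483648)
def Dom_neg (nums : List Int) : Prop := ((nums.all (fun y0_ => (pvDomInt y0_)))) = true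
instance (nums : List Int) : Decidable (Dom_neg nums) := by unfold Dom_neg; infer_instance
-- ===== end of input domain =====

-- B replaces A's single backward writing loop by two forward passes (count all negatives, then total minus running prefix count); alternative decomposition, same cost.


-- ===== PORT A =====
-- A walks i from len-1 down to 0, writing res[i] = neg (negatives seen so far from the right)
-- before updating neg on nums[i] < 0. Structurally: recurse to the tail first, carry the
-- running count back; at each cell the written value is the count for the tail.
def negLoopA (nums : List Int) : List Int × Int :=
  match nums with
  | [] => ([], 0)
  | x :: xs =>
      let (r, c) := negLoopA xs
      (c :: r, if x < 0 then c + 1 else c)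

def neg (nums : List Int) : List Int := (negLoopA nums).1

-- ===== PORT B =====
-- total = sum(1 for x in nums if x < 0)
def negTotalB (nums : List Int) : Int :=
  match nums with
  | [] => 0
  | x :: xs => (if x < 0 then 1 else 0) + negTotalB xs

-- forward loop: update seen, append total - seen
def negLoopB (total : Int) (nums : List Int) (seen : Int) : List Int :=
  match nums with
  | [] => []
  | x :: xs =>
      let seen' := if x < 0 then seen + 1 else seen
      (total - seen') :: negLoopB total xs seen'

def neg_alt (nums : List Int) : List Int := negLoopB (negTotalB nums) nums 0

-- ===== PRECONDITION & SPEC =====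
def Spec_neg (nums : List Int) (out : List Int) : Prop := out = neg_alt nums
instance (nums : List Int) (out : List Int) : Decidable (Spec_neg nums out) := by unfold Spec_neg; infer_instance

-- ===== CLAIM (what is proved, stated in full; the proofs are below) =====
def Claim_equal_neg : Prop := ∀ (nums : List Int), Dom_neg nums → Spec_neg nums (neg nums)

-- ===== LEMMAS AND PROOFS =====
theorem negLoopA_snd (nums : List Int) : (negLoopA nums).2 = negTotalB nums := by
  induction nums with
  | nil => rfl
  | cons x xs ih =>
      simp only [negLoopA, negTotalB]
      split_ifs with h <;> simp [ih] <;> omega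

theorem negLoopB_eq (nums : List Int) (seen total : Int)
    (h : total = seen + negTotalB nums) :
    negLoopB total nums seen = (negLoopA nums).1 := by
  induction nums generalizing seen with
  | nil => rfl
  | cons x xs ih =>
      simp only [negLoopB, negLoopA]
      have hs : (negLoopA xs).2 = negTotalB xs := negLoopA_snd xs
      simp only [negTotalB] at h
      split_ifs with hx
      · simp only [List.cons.injEq]
        exact ⟨by omega, ih _ (by omega)⟩
      · simp only [List.cons.injEq]
        exact ⟨by omega, ih _ (by omega)⟩

-- ===== VERDICT (by name: the statement is the Claim_ definition above) =====
theorem neg_spec : Claim_equal_neg := by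
  intro nums _
  unfold Spec_neg neg neg_alt
  exact (negLoopB_eq nums 0 _ (by omega)).symm
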